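-- pv_equiv track=rewrite | github.com/amandazhuyilan/Breakfast-Burrito | Problems-and-Solutions/python/G_OnlineAssessment2.py | ifContinue
-- ===== SOURCE A (Python) =====
-- def ifContinue(input_list, k):
-- 	input_list = sorted(input_list)
-- 	diff = []
-- 	for index in range(len(input_list)-1):
-- 		diff.append(input_list[index+1]-input_list[index])
-- 	if diff.count(1) == k - 1:
-- 		return True
-- 	else:
-- 		return False
-- ===== SOURCE B (Python) =====
-- def ifContinue(input_list, k):
--     s = set(input_list)
--     return sum(1 for x in s if x + 1 in s) == k - 1
-- ===== Notes on version B (the rewrite author's own statement) =====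
-- stated objective: idiomatic
-- what changed: Replaces the sort plus adjacent-difference list with a set: count distinct x with x+1 also present and compare to k-1.
import Mathlib
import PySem

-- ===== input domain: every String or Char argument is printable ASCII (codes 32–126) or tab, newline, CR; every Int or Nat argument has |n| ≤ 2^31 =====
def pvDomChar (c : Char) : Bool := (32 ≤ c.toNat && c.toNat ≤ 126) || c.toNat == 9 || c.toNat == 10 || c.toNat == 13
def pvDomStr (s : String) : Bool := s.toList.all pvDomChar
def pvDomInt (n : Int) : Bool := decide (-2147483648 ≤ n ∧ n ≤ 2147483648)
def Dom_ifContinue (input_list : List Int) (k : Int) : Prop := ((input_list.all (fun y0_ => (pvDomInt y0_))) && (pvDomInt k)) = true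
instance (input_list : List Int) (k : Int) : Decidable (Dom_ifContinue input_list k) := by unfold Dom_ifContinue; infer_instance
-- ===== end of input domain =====

-- B replaces the sort + adjacent-difference list by a set pass: count distinct x with x+1 also present (idiomatic; return value only).

-- ===== PORT A =====
def ifContinue (input_list : List Int) (k : Int) : Bool :=
  let l := PySem.List.sorted input_list (fun x => x) false
  let diff := (PySem.List.pyRange 0 (PySem.List.len l - 1) 1).foldl
      (fun acc index => acc ++ [PySem.List.pyGetD l (index + 1) 0 - PySem.List.pyGetD l index 0]) []
  if (PySem.List.count diff 1 : Int) = k - 1 then true else false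

-- ===== PORT B =====
def ifContinue_alt (input_list : List Int) (k : Int) : Bool :=
  let s := PySem.Set.ofList input_list
  decide ((s.countP (fun x => PySem.Set.contains s (x + 1)) : Int) = k - 1)

-- ===== PRECONDITION & SPEC =====
def Spec_ifContinue (input_list : List Int) (k : Int) (out : Bool) : Prop := out = ifContinue_alt input_list k
instance (input_list : List Int) (k : Int) (out : Bool) : Decidable (Spec_ifContinue input_list k out) := by unfold Spec_ifContinue; infer_instance

-- ===== CLAIM (what is proved, stated in full; the proofs are below) =====
def Claim_equal_ifContinue : Prop := ∀ (input_list : List Int) (k : Int), Dom_ifContinue input_list k → Spec_ifContinue input_list k (ifContinue input_list k)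

-- ===== LEMMAS AND PROOFS =====

-- A's diff list over indices is the list of adjacent differences (zipWith on the tail).
theorem map_range_getD_eq_zipWith (l : List Int) :
    (List.range (l.length - 1)).map (fun n => l.getD (n + 1) 0 - l.getD n 0)
      = List.zipWith (fun a b => b - a) l l.tail := by
  induction l with
  | nil => simp
  | cons a t ih =>
    cases t with
    | nil => simp
    | cons b t' =>
      have ih' := ih
      simp only [List.length_cons, Nat.add_sub_cancel, List.tail_cons] at ih'
      simp only [List.length_cons, Nat.add_sub_cancel, List.range_succ_eq_map,
        List.map_cons, List.map_map, List.tail_cons, List.zipWith_cons_cons]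
      refine congrArg₂ List.cons (by simp) ?_
      rw [← ih']
      apply List.map_congr_left
      intro n _
      rfl

-- Core identity: on a sorted list, the number of adjacent differences equal to 1
-- is the number of distinct x with x+1 also present.
theorem count_one_zipWith_sorted (l : List Int) (h : l.Pairwise (· ≤ ·)) :
    (List.zipWith (fun a b => b - a) l l.tail).count 1
      = (l.toFinset.filter (fun x => x + 1 ∈ l.toFinset)).card := by
  induction l with
  | nil => simp
  | cons a t ih =>
    cases t with
    | nil => simp [Finset.filter_singleton]
    | cons b t' =>
      have hab : a ≤ b := (List.pairwise_cons.1 h).1 b (by simp)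
      have ht : (b :: t').Pairwise (· ≤ ·) := (List.pairwise_cons.1 h).2
      have hble : ∀ x ∈ b :: t', b ≤ x := by
        intro x hx
        rcases List.mem_cons.1 hx with rfl | hx'
        · exact le_refl x
        · exact (List.pairwise_cons.1 ht).1 x hx'
      have ihv := ih ht
      simp only [List.tail_cons] at ihv ⊢
      rw [show List.zipWith (fun a b => b - a) (a :: b :: t') (b :: t')
            = (b - a) :: List.zipWith (fun a b => b - a) (b :: t') t' from rfl]
      rw [List.count_cons, ihv]
      rcases eq_or_lt_of_le hab with rfl | hlt
      · -- a = b : diff is 0, and the value set is unchanged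
        have hset : (a :: a :: t').toFinset = (a :: t').toFinset := by simp
        rw [hset]
        simp
      · -- a < b : a is a new minimum
        have hnotmem : a ∉ (b :: t').toFinset := by
          simp only [List.mem_toFinset]
          intro hmem
          exact absurd (hble a hmem) (not_le.2 hlt)
        have hset : (a :: b :: t').toFinset = insert a (b :: t').toFinset := by simp
        rw [hset]
        set S := (b :: t').toFinset with hS
        have hfc : ∀ x ∈ S, ((x + 1 ∈ insert a S) = (x + 1 ∈ S)) := by
          intro x hx
          have hbx : b ≤ x := hble x (by rwa [hS, List.mem_toFinset] at hx)
          have hxa : x + 1 ≠ a := by omega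
          simp [Finset.mem_insert, hxa]
        have hfilter : S.filter (fun x => x + 1 ∈ insert a S)
            = S.filter (fun x => x + 1 ∈ S) := by
          apply Finset.filter_congr
          intro x hx
          exact eq_iff_iff.1 (hfc x hx)
        have hpa : (a + 1 ∈ insert a S) ↔ b = a + 1 := by
          constructor
          · intro hmem
            rcases Finset.mem_insert.1 hmem with heq | hmem'
            · omega
            · have : b ≤ a + 1 := hble (a + 1) (by rwa [hS, List.mem_toFinset] at hmem')
              omega
          · intro hb
            apply Finset.mem_insert_of_mem
            rw [hS, List.mem_toFinset]
            simp [← hb]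
        rw [Finset.filter_insert]
        by_cases hb1 : b = a + 1
        · have hcond : a + 1 ∈ insert a S := hpa.2 hb1
          have hdiff : ((b - a : Int) == 1) = true := by simp; omega
          rw [if_pos hcond, hfilter, Finset.card_insert_of_notMem
            (fun hmem => hnotmem (Finset.mem_of_mem_filter a hmem))]
          simp [hdiff]
        · have hcond : a + 1 ∉ insert a S := fun hmem => hb1 (hpa.1 hmem)
          have hdiff : ((b - a : Int) == 1) = false := by simp; omega
          rw [if_neg hcond, hfilter]
          simp [hdiff]

-- B's set count is the filtered-card of distinct values.
theorem countP_set_eq_card (l : List Int) :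
    (PySem.Set.ofList l).countP (fun x => PySem.Set.contains (PySem.Set.ofList l) (x + 1))
      = (l.toFinset.filter (fun x => x + 1 ∈ l.toFinset)).card := by
  have hmem : ∀ y : Int, y ∈ PySem.Set.ofList l ↔ y ∈ l := fun y => PySem.Set.mem_ofList l y
  have hfin : (PySem.Set.ofList l).toFinset = l.toFinset := by
    ext y; simp [List.mem_toFinset, hmem y]
  have hnd : (PySem.Set.ofList l).Nodup := PySem.Set.nodup_ofList l
  have hp : ∀ x : Int, PySem.Set.contains (PySem.Set.ofList l) (x + 1)
      = decide (x + 1 ∈ l.toFinset) := by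
    intro x
    simp [PySem.Set.contains, List.contains_eq_mem, hmem, List.mem_toFinset]
  calc (PySem.Set.ofList l).countP (fun x => PySem.Set.contains (PySem.Set.ofList l) (x + 1))
      = ((PySem.Set.ofList l).filter (fun x => decide (x + 1 ∈ l.toFinset))).length := by
        rw [List.countP_eq_length_filter]
        congr 1
        apply List.filter_congr
        intro x _
        exact hp x
    _ = ((PySem.Set.ofList l).filter (fun x => decide (x + 1 ∈ l.toFinset))).toFinset.card := by
        rw [List.toFinset_card_of_nodup (List.Nodup.filter _ hnd)]
    _ = ((PySem.Set.ofList l).toFinset.filter (fun x => x + 1 ∈ l.toFinset)).card := by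
        rw [List.toFinset_filter]
        simp
    _ = (l.toFinset.filter (fun x => x + 1 ∈ l.toFinset)).card := by rw [hfin]

-- ===== VERDICT (by name: the statement is the Claim_ definition above) =====
theorem ifContinue_spec : Claim_equal_ifContinue := by
  intro input_list k _
  unfold Spec_ifContinue ifContinue ifContinue_alt
  dsimp only
  set l := PySem.List.sorted input_list (fun x => x) false with hl
  have hperm : l.Perm input_list := PySem.List.sorted_perm input_list (fun x => x) false
  have hsorted : l.Pairwise (· ≤ ·) := PySem.List.sorted_pairwise input_list (fun x => x)
  have h1 : (PySem.List.len l - 1 - 0).toNat = l.length - 1 := by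
    simp [PySem.List.len]
  have hdiff : (PySem.List.pyRange 0 (PySem.List.len l - 1) 1).map
        (fun index => PySem.List.pyGetD l (index + 1) 0 - PySem.List.pyGetD l index 0)
      = List.zipWith (fun a b => b - a) l l.tail := by
    rw [PySem.List.pyRange_one, h1, List.map_map, ← map_range_getD_eq_zipWith]
    apply List.map_congr_left
    intro n _
    simp only [Function.comp, zero_add]
    rw [show ((n : Int) + 1) = ((n + 1 : Nat) : Int) from by push_cast; ring,
       PySem.List.pyGetD_natCast, PySem.List.pyGetD_natCast]
  rw [PySem.List.foldl_append_singleton_eq_map]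
  simp only [List.nil_append]
  rw [hdiff]
  have hcount : ((PySem.List.count (List.zipWith (fun a b => b - a) l l.tail) 1 : Nat) : Int)
      = ((List.countP (fun x => (PySem.Set.ofList input_list).contains (x + 1))
          (PySem.Set.ofList input_list) : Nat) : Int) := by
    rw [PySem.List.count_eq, count_one_zipWith_sorted l hsorted,
        List.toFinset_eq_of_perm l input_list hperm, ← countP_set_eq_card]
  simp only [hcount]
  simp
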